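-- pv_equiv track=rewrite | github.com/rogowskz/rogowskz.github.io | cpi-adjust.py | getTableRows
-- ===== SOURCE A (Python) =====
-- def getTableRows(lines):
--     head = []
--     table = []
--     tail = []
--
--     for line in lines:
--         line = line.strip()
--         if line.startswith("|"):
--             table.append([x.strip() for x in line.split("|")])
--         else:
--             if not table:
--                 head.append(line)
--             else:
--                 tail.append(line)
--     return head, table, tail
-- ===== SOURCE B (Python) =====
-- def getTableRows(lines):
--     stripped = [l.strip() for l in lines]
--     first = next((i for i, l in enumerate(stripped) if l.startswith("|")), len(stripped))
--     table = [[x.strip() for x in l.split("|")] for l in stripped if l.startswith("|")]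
--     head = stripped[:first]
--     tail = [l for l in stripped[first:] if not l.startswith("|")]
--     return head, table, tail
-- ===== Notes on version B (the rewrite author's own statement) =====
-- stated objective: alternative
-- what changed: Replaces the single stateful loop (whose head/tail routing depends on the accumulated table) with a stateless decomposition: strip once, locate the first table row's index, then build head/table/tail by independent slicing and filtering comprehensions.
import Mathlib
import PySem

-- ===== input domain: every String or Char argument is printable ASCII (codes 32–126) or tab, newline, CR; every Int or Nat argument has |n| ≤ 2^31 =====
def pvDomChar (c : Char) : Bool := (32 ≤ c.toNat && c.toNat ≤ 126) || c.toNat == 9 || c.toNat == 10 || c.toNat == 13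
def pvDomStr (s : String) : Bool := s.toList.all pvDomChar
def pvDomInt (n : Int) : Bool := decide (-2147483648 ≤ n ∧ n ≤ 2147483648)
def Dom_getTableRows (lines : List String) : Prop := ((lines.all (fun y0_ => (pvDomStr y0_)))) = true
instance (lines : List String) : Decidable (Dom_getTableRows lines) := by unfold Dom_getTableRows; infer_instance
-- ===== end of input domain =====

-- B replaces A's stateful loop by strip-once + index-of-first-table-row + independent slice/filter passes (alternative decomposition, same cost).

-- ===== PORT A =====
-- A's loop body, on the state (head, table, tail)
def pvStepA (st : List String × List (List String) × List String) (line : String) :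
    List String × List (List String) × List String :=
  let line := PySem.Str.strip line
  if PySem.Str.startswith line "|" then
    (st.1, st.2.1 ++ [((PySem.Str.split? line "|").getD []).map PySem.Str.strip], st.2.2)
  else if st.2.1 = [] then
    (st.1 ++ [line], st.2.1, st.2.2)
  else
    (st.1, st.2.1, st.2.2 ++ [line])

def getTableRows (lines : List String) : List String × List (List String) × List String :=
  lines.foldl pvStepA ([], [], [])

-- ===== PORT B =====
-- [x.strip() for x in l.split("|")]
def pvParseRow (l : String) : List String :=
  ((PySem.Str.split? l "|").getD []).map PySem.Str.strip

def getTableRows_alt (lines : List String) : List String × List (List String) × List String :=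
  let stripped := lines.map PySem.Str.strip
  let first := stripped.findIdx (fun l => PySem.Str.startswith l "|")
  let table := (stripped.filter (fun l => PySem.Str.startswith l "|")).map pvParseRow
  let head := stripped.take first
  let tail := (stripped.drop first).filter (fun l => !(PySem.Str.startswith l "|"))
  (head, table, tail)

-- ===== PRECONDITION & SPEC =====
def Spec_getTableRows (lines : List String) (out : List String × List (List String) × List String) : Prop := out = getTableRows_alt lines
instance (lines : List String) (out : List String × List (List String) × List String) : Decidable (Spec_getTableRows lines out) := by unfold Spec_getTableRows; infer_instance

-- ===== CLAIM (what is proved, stated in full; the proofs are below) =====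
def Claim_equal_getTableRows : Prop := ∀ (lines : List String), Dom_getTableRows lines → Spec_getTableRows lines (getTableRows lines)

-- ===== LEMMAS AND PROOFS =====

-- once the table is nonempty, A never touches head and routes every non-"|" line to tail
theorem foldl_stepA_nonempty (ls : List String) :
    ∀ (h : List String) (t : List (List String)) (tl : List String), t ≠ [] →
    ls.foldl pvStepA (h, t, tl) =
      (h,
       t ++ ((ls.filter (fun l => PySem.Str.startswith (PySem.Str.strip l) "|")).map
              (fun l => pvParseRow (PySem.Str.strip l))),
       tl ++ ((ls.filter (fun l => !(PySem.Str.startswith (PySem.Str.strip l) "|"))).map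
              PySem.Str.strip)) := by
  induction ls with
  | nil => intro h t tl ht; simp
  | cons l ls ih =>
    intro h t tl ht
    by_cases hb : PySem.Chars.startswith (PySem.Chars.strip l.toList) ['|'] = true
    · have hstep : pvStepA (h, t, tl) l = (h, t ++ [pvParseRow (PySem.Str.strip l)], tl) := by
        simp [pvStepA, hb, pvParseRow]
      rw [List.foldl_cons, hstep, ih _ _ _ (by simp)]
      simp [hb]
    · have hstep : pvStepA (h, t, tl) l = (h, t, tl ++ [PySem.Str.strip l]) := by
        simp [pvStepA, hb, ht]
      rw [List.foldl_cons, hstep, ih _ _ _ ht]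
      simp [hb]

-- while the table is empty, A's loop computes B's take/filter/drop decomposition
theorem foldl_stepA_empty (ls : List String) :
    ∀ (h tl : List String),
    ls.foldl pvStepA (h, [], tl) =
      (h ++ ((ls.take (ls.findIdx (fun l => PySem.Str.startswith (PySem.Str.strip l) "|"))).map
              PySem.Str.strip),
       (ls.filter (fun l => PySem.Str.startswith (PySem.Str.strip l) "|")).map
              (fun l => pvParseRow (PySem.Str.strip l)),
       tl ++ (((ls.drop (ls.findIdx (fun l => PySem.Str.startswith (PySem.Str.strip l) "|"))).filter
              (fun l => !(PySem.Str.startswith (PySem.Str.strip l) "|"))).map PySem.Str.strip)) := by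
  induction ls with
  | nil => intro h tl; simp
  | cons l ls ih =>
    intro h tl
    by_cases hb : PySem.Chars.startswith (PySem.Chars.strip l.toList) ['|'] = true
    · have hstep : pvStepA (h, [], tl) l = (h, [pvParseRow (PySem.Str.strip l)], tl) := by
        simp [pvStepA, hb, pvParseRow]
      rw [List.foldl_cons, hstep, foldl_stepA_nonempty _ _ _ _ (by simp)]
      simp [List.findIdx_cons, hb]
    · have hstep : pvStepA (h, [], tl) l = (h ++ [PySem.Str.strip l], [], tl) := by
        simp [pvStepA, hb]
      rw [List.foldl_cons, hstep, ih]
      simp [List.findIdx_cons, hb]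

-- ===== VERDICT (by name: the statement is the Claim_ definition above) =====
theorem getTableRows_spec : Claim_equal_getTableRows := by
  intro lines _
  unfold Spec_getTableRows getTableRows getTableRows_alt
  rw [foldl_stepA_empty]
  simp [List.findIdx_map, List.filter_map, ← List.map_drop, Function.comp_def]
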